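-- pv_equiv track=rewrite | github.com/davidcmitchell/Kattis | Base-2 Palindromes.py | get_nth_odd_pal
-- ===== SOURCE A (Python) =====
-- def get_nth_odd_pal(nth,digs):
--     if nth == 1:
--         return digs
--     mid = int(len(digs)/2)
--     if nth == 2:
--         digs[mid] = 1
--         return digs
--     count = [1]
--     total = 2
--     i = 1
--     while total < nth:
--         if (i+1) % 2 == 0:
--             count.append(0)
--         else:
--             count.append(count[i-2]*2)
--             total += count[-1]
--         i += 1
--     dist = int((len(count) - 1) / 2)
--     digs[mid + dist] = 1
--     digs[mid - dist] = 1
--     total = total-count[-1]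
--     return get_nth_odd_pal(nth-total,digs)
-- ===== SOURCE B (Python) =====
-- def get_nth_odd_pal(nth, digs):
--     # Iterative version: instead of rebuilding A's count array each level,
--     # the gap is read off directly from the bit length of nth-1.
--     while nth > 2:
--         mid = len(digs) // 2
--         d = (nth - 1).bit_length() - 1
--         digs[mid + d] = 1
--         digs[mid - d] = 1
--         nth -= 1 << d
--     if nth == 2:
--         digs[len(digs) // 2] = 1
--     return digs
-- ===== Notes on version B (the rewrite author's own statement) =====
-- stated objective: simpler
-- what changed: Replaces A's tail recursion and its per-level rebuild of the count array by a single while loop that reads the write offset directly from (nth-1).bit_length() and subtracts 1<<d in place.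
import Mathlib
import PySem

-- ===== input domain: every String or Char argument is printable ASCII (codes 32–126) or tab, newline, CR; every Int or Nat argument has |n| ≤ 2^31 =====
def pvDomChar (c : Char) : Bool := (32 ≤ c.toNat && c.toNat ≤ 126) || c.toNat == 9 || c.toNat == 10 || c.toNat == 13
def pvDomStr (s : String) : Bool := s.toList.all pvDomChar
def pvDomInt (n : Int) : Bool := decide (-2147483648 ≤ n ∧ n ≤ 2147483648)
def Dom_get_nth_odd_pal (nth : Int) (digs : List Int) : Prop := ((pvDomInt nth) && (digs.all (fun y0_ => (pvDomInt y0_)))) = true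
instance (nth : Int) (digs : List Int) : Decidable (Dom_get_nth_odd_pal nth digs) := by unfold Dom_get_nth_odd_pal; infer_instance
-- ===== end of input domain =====

-- B replaces A's recursion and per-level count-array rebuild by a while loop reading the
-- gap from (nth-1).bit_length() (objective: simpler). Both Pythons mutate digs in place
-- with the identical writes; the equivalence proved here is about the return value.

-- ===== PORT A =====
-- the while loop building count; fuel 0 returns the state unchanged (never reached under Pre_)
def aCountLoop (nth : Int) : Nat → List Int → Int → Int → List Int × Int
  | 0, count, total, _ => (count, total)
  | f + 1, count, total, i =>
    if total < nth then
      if PySem.Int.mod (i + 1) 2 == 0 then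
        aCountLoop nth f (count ++ [0]) total (i + 1)
      else
        -- count[i-2]: always in range in every reachable state (i even ≥ 2, len count = i)
        let v := PySem.List.pyGetD count (i - 2) 0 * 2
        aCountLoop nth f (count ++ [v]) (total + v) (i + 1)
    else (count, total)

-- the recursion of A, fuel-bounded; int(len/2) = len//2 exactly since len ≥ 0
def aRec : Nat → Int → List Int → List Int
  | 0, _, digs => digs
  | f + 1, nth, digs =>
    if nth == 1 then digs
    else
      let mid : Int := ((digs.length / 2 : Nat) : Int)
      if nth == 2 then PySem.List.pySetD digs mid 1
      else
        let ct := aCountLoop nth (2 * nth.toNat + 4) [1] 2 1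
        let dist : Int := (((ct.1.length - 1) / 2 : Nat) : Int)
        let digs1 := PySem.List.pySetD digs (mid + dist) 1
        let digs2 := PySem.List.pySetD digs1 (mid - dist) 1
        aRec f (nth - (ct.2 - PySem.List.pyGetD ct.1 (-1) 0)) digs2

def get_nth_odd_pal (nth : Int) (digs : List Int) : List Int := aRec nth.toNat nth digs

-- ===== PORT B =====
-- the while loop of B, fuel-bounded; 1 << d ported as 2 ^ d.toNat (d ≥ 1 whenever entered)
def bLoop : Nat → Int → List Int → Int × List Int
  | 0, nth, digs => (nth, digs)
  | f + 1, nth, digs =>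
    if 2 < nth then
      let mid : Int := ((digs.length / 2 : Nat) : Int)
      let d : Int := (PySem.Int.bitLength (nth - 1) : Int) - 1
      let digs1 := PySem.List.pySetD digs (mid + d) 1
      let digs2 := PySem.List.pySetD digs1 (mid - d) 1
      bLoop f (nth - 2 ^ d.toNat) digs2
    else (nth, digs)

def get_nth_odd_pal_alt (nth : Int) (digs : List Int) : List Int :=
  let r := bLoop nth.toNat nth digs
  if r.1 == 2 then PySem.List.pySetD r.2 ((r.2.length / 2 : Nat) : Int) 1 else r.2

-- ===== PRECONDITION & SPEC =====
-- Pre_ excludes exactly the inputs where A raises: nth ≤ 0 (unbounded recursion,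
-- RecursionError) and digs too short for the first (widest) pair of writes (IndexError);
-- a negative mid-d down to -len wraps in Python, both programs wrap identically, so it stays inside.
def Pre_get_nth_odd_pal (nth : Int) (digs : List Int) : Prop :=
  1 ≤ nth ∧ (nth = 2 → digs ≠ []) ∧
  (3 ≤ nth →
    ((digs.length / 2 : Nat) : Int) + ((PySem.Int.bitLength (nth - 1) : Int) - 1) < (digs.length : Int) ∧
    -(digs.length : Int) ≤ ((digs.length / 2 : Nat) : Int) - ((PySem.Int.bitLength (nth - 1) : Int) - 1))
instance (nth : Int) (digs : List Int) : Decidable (Pre_get_nth_odd_pal nth digs) := by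
  unfold Pre_get_nth_odd_pal; infer_instance
def pvWitness_get_nth_odd_pal : Int × List Int := (4, [0, 0, 0, 0, 0])

def Spec_get_nth_odd_pal (nth : Int) (digs : List Int) (out : List Int) : Prop := out = get_nth_odd_pal_alt nth digs
instance (nth : Int) (digs : List Int) (out : List Int) : Decidable (Spec_get_nth_odd_pal nth digs out) := by unfold Spec_get_nth_odd_pal; infer_instance

-- ===== CLAIM (what is proved, stated in full; the proofs are below) =====
def Claim_equal_get_nth_odd_pal : Prop := ∀ (nth : Int) (digs : List Int), Dom_get_nth_odd_pal nth digs → Pre_get_nth_odd_pal nth digs → Spec_get_nth_odd_pal nth digs (get_nth_odd_pal nth digs)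

-- ===== LEMMAS AND PROOFS =====

-- the count array A builds after 2*m loop iterations: [1, 0, 2, 0, 4, ..., 0, 2^m]
def Carr : Nat → List Int
  | 0 => [1]
  | m + 1 => Carr m ++ [0, 2 ^ (m + 1)]

theorem Carr_length (m : Nat) : (Carr m).length = 2 * m + 1 := by
  induction m with
  | zero => rfl
  | succ m ih => simp [Carr, ih]; omega

theorem Carr_last (m : Nat) : PySem.List.pyGetD (Carr m) (-1) 0 = 2 ^ m := by
  cases m with
  | zero => decide
  | succ m => simp [Carr, PySem.List.pyGetD, PySem.List.pyGet?_neg_one]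

theorem Carr_getD (m : Nat) : (Carr m).getD (2 * m) 0 = 2 ^ m := by
  induction m with
  | zero => rfl
  | succ m ih =>
    have hl := Carr_length m
    rw [Carr, List.getD, List.getElem?_append_right (by omega)]
    rw [hl]
    have h1 : 2 * (m + 1) - (2 * m + 1) = 1 := by omega
    rw [h1]; rfl

theorem Carr_get (m : Nat) :
    PySem.List.pyGetD (Carr m ++ [0]) ((2 * m : Nat) : Int) 0 = 2 ^ m := by
  have hl := Carr_length m
  have h := Carr_getD m
  rw [PySem.List.pyGetD_natCast]
  simp [List.getD, List.getElem?_append_left (by omega : 2 * m < (Carr m).length)] at h ⊢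
  simpa using h

theorem aCountLoop_spec (nth : Int) (k : Nat) : ∀ (m fuel : Nat),
    nth ≤ 2 ^ (m + k + 1) → (∀ j < k, (2 : Int) ^ (m + j + 1) < nth) → 2 * k ≤ fuel →
    aCountLoop nth fuel (Carr m) (2 ^ (m + 1)) (2 * (m : Int) + 1) =
      (Carr (m + k), 2 ^ (m + k + 1)) := by
  induction k with
  | zero =>
    intro m fuel hle _ _
    have hle' : nth ≤ 2 ^ (m + 1) := by simpa using hle
    cases fuel with
    | zero => simp [aCountLoop]
    | succ f =>
      rw [aCountLoop, if_neg (not_lt.mpr hle')]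
      simp
  | succ k ih =>
    intro m fuel hle hgt hfuel
    have hlt : (2 : Int) ^ (m + 1) < nth := by
      have := hgt 0 (by omega); simpa using this
    obtain ⟨f, rfl⟩ : ∃ f, fuel = f + 2 := ⟨fuel - 2, by omega⟩
    rw [aCountLoop, if_pos (by omega)]
    rw [if_pos (by
      rw [beq_iff_eq, PySem.Int.mod_eq_zero_iff_dvd]
      exact ⟨(m : Int) + 1, by ring⟩)]
    rw [aCountLoop, if_pos (by omega)]
    rw [if_neg (by
      rw [beq_iff_eq, PySem.Int.mod_eq_zero_iff_dvd]
      rintro ⟨c, hc⟩; omega)]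
    have hidx : (2 * (m : Int) + 1 + 1 - 2) = ((2 * m : Nat) : Int) := by push_cast; ring
    rw [hidx, Carr_get]
    show aCountLoop nth f (Carr m ++ [0] ++ [2 ^ m * 2]) (2 ^ (m + 1) + 2 ^ m * 2)
        (2 * (m : Int) + 1 + 1 + 1) = _
    have hC : Carr m ++ [0] ++ [2 ^ m * 2] = Carr (m + 1) := by
      simp [Carr, pow_succ]
    have hT : (2 : Int) ^ (m + 1) + 2 ^ m * 2 = 2 ^ (m + 1 + 1) := by ring
    have hI : (2 * (m : Int) + 1 + 1 + 1) = 2 * ((m + 1 : Nat) : Int) + 1 := by push_cast; ring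
    rw [hC, hT, hI]
    have h3 : m + 1 + k = m + (k + 1) := by omega
    have := ih (m + 1) f (by rw [show m + 1 + k + 1 = m + (k+1) + 1 by omega]; exact hle)
      (fun j hj => by have := hgt (j + 1) (by omega); convert this using 2; omega) (by omega)
    rw [this, h3]

theorem bitLength_bounds (nth : Int) (h : 3 ≤ nth) :
    2 ≤ PySem.Int.bitLength (nth - 1) ∧
    (2 : Int) ^ (PySem.Int.bitLength (nth - 1) - 1) < nth ∧
    nth ≤ 2 ^ (PySem.Int.bitLength (nth - 1)) := by
  have h0 : (nth - 1).natAbs = (nth - 1).toNat := by omega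
  have h1 := PySem.Int.two_pow_bitLength_le (nth - 1) (by omega)
  have h2 := PySem.Int.lt_two_pow_bitLength (nth - 1)
  set b := PySem.Int.bitLength (nth - 1) with hb
  have hb2 : 2 ≤ b := by
    by_contra hc
    interval_cases b <;> omega
  refine ⟨hb2, ?_, ?_⟩
  · have : ((2 ^ (b - 1) : Nat) : Int) ≤ nth - 1 := by
      rw [h0] at h1; omega
    push_cast at this; omega
  · have : nth - 1 < ((2 ^ b : Nat) : Int) := by rw [h0] at h2; omega
    push_cast at this; omega

theorem main_align (fuel : Nat) : ∀ (nth : Int) (digs : List Int), 1 ≤ nth → nth.toNat ≤ fuel →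
    aRec fuel nth digs =
      (let r := bLoop fuel nth digs
       if r.1 == 2 then PySem.List.pySetD r.2 ((r.2.length / 2 : Nat) : Int) 1 else r.2) := by
  induction fuel with
  | zero => intro nth digs h1 h2; omega
  | succ f ih =>
    intro nth digs h1 hf
    by_cases e1 : nth = 1
    · subst e1
      simp [aRec, bLoop]
    by_cases e2 : nth = 2
    · subst e2
      simp [aRec, bLoop]
    have h3 : 3 ≤ nth := by omega
    have e1' : (nth == 1) = false := by simp; omega
    have e2' : (nth == 2) = false := by simp; omega
    simp only [aRec, bLoop, e1', e2', Bool.false_eq_true, if_false,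
      if_pos (show 2 < nth by omega)]
    obtain ⟨hb2, hlo, hhi⟩ := bitLength_bounds nth h3
    set b := PySem.Int.bitLength (nth - 1) with hbdef
    set M := b - 1 with hM
    have hMb : M + 1 = b := by omega
    have hMnat : (2 : Int) ^ M < nth := by rw [hM]; exact hlo
    have hMfuel : 2 * M ≤ 2 * nth.toNat + 4 := by
      have hm2 : M < 2 ^ M := Nat.lt_two_pow_self
      have : ((2 ^ M : Nat) : Int) < nth := by push_cast; exact hMnat
      omega
    have hct : aCountLoop nth (2 * nth.toNat + 4) [1] 2 1 = (Carr M, 2 ^ (M + 1)) := by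
      have := aCountLoop_spec nth M 0 (2 * nth.toNat + 4)
        (by rw [Nat.zero_add, hMb]; exact hhi)
        (fun j hj => by
          have hle : (2 : Int) ^ (j + 1) ≤ 2 ^ M :=
            pow_le_pow_right₀ (by omega) (by omega)
          calc (2:Int) ^ (0 + j + 1) = 2 ^ (j+1) := by rw [Nat.zero_add]
            _ ≤ 2 ^ M := hle
            _ < nth := hMnat)
        hMfuel
      simpa [Carr] using this
    have hd : ((b : Int) - 1) = ((M : Nat) : Int) := by omega
    have hlen : (Carr M).length = 2 * M + 1 := Carr_length M
    have hdist : ((2 * M + 1 - 1) / 2 : Nat) = M := by omega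
    have hlast : PySem.List.pyGetD (Carr M) (-1) 0 = 2 ^ M := Carr_last M
    have hsub : nth - ((2:Int) ^ (M + 1) - 2 ^ M) = nth - 2 ^ M := by ring_nf
    have hrec := ih (nth - 2 ^ M) (PySem.List.pySetD
        (PySem.List.pySetD digs (((digs.length / 2 : Nat) : Int) + ((M : Nat) : Int)) 1)
        (((digs.length / 2 : Nat) : Int) - ((M : Nat) : Int)) 1)
      (by omega)
      (by
        have hM1 : 1 ≤ M := by omega
        have : (2 : Int) ≤ 2 ^ M := by
          calc (2:Int) = 2 ^ 1 := by ring
            _ ≤ 2 ^ M := pow_le_pow_right₀ (by omega) hM1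
        omega)
    simp only [hct, hlen, hdist, hlast, hd, hsub, Int.toNat_natCast]
    exact hrec

-- ===== VERDICT (by name: the statement is the Claim_ definition above) =====
theorem get_nth_odd_pal_spec : Claim_equal_get_nth_odd_pal := by
  intro nth digs _ hpre
  unfold Spec_get_nth_odd_pal get_nth_odd_pal get_nth_odd_pal_alt
  exact main_align nth.toNat nth digs hpre.1 le_rfl
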